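-- pv_equiv track=rewrite | github.com/obabichev/acmp-py | acmp/872.py | solution
-- ===== SOURCE A (Python) =====
-- def find_max_prefix(dictionary, word):
--     _max = 0
--     for prefix, count in dictionary.items():
--         if len(prefix) < len(word) and word.startswith(prefix):
--             _max = max(_max, count)
--     return _max
--
-- def solution(n, words):
--     words = sorted(words)
--     chains = dict()
--     for word in words:
--         existing_chain_length = find_max_prefix(chains, word)
--         if word in chains:
--             chains[word] = max(existing_chain_length + 1, chains[word])
--         else:
--             chains[word] = existing_chain_length + 1
--     return max(chains.values())
-- ===== SOURCE B (Python) =====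
-- def longest_prefix_value(chains, word):
--     # probe the strict prefixes of word from longest to shortest;
--     # the first one present in chains carries the longest chain among them
--     for k in range(len(word) - 1, -1, -1):
--         p = word[:k]
--         if p in chains:
--             return chains[p] + 1
--     return 1
--
-- def solution(n, words):
--     chains = {}
--     best = 0
--     for word in sorted(words):
--         v = longest_prefix_value(chains, word)
--         chains[word] = v
--         if v > best:
--             best = v
--     return best
-- ===== Notes on version B (the rewrite author's own statement) =====
-- stated objective: faster
-- what changed: Instead of rescanning every dictionary entry with startswith for each word (find_max_prefix), B probes only the strict prefixes of the current word from longest to shortest and takes the first hash hit, keeping a running maximum instead of max(chains.values()).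
import Mathlib
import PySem

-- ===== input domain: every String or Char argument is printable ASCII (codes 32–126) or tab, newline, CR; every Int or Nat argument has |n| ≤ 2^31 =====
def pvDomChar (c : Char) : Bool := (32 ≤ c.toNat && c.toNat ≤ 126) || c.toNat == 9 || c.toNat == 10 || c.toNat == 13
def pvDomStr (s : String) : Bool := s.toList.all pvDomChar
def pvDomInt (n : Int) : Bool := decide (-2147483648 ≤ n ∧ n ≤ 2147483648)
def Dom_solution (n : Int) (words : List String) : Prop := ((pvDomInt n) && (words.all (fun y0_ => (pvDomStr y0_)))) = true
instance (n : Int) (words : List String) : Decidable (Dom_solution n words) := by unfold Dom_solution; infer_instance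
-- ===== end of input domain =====

-- B replaces A's per-word scan of ALL dictionary entries (find_max_prefix) by probing only the
-- strict prefixes of the current word from longest to shortest, and keeps a running maximum;
-- objective: faster (the inner scan over the whole dict disappears).

-- ===== PORT A =====
def find_max_prefix (dictionary : PySem.Dict String Int) (word : String) : Int :=
  dictionary.items.foldl (fun _max pc =>
    if PySem.Str.len pc.1 < PySem.Str.len word ∧ PySem.Str.startswith word pc.1
    then max _max pc.2 else _max) 0

def solution (n : Int) (words : List String) : Int :=
  let ws := PySem.List.sorted words (fun x => x)
  let chains := ws.foldl (fun chains word =>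
      let existing_chain_length := find_max_prefix chains word
      if chains.contains word
      then chains.insert word (max (existing_chain_length + 1) (chains.getD word 0))
      else chains.insert word (existing_chain_length + 1))
    PySem.Dict.empty
  (PySem.List.max? chains.values (fun v => v)).getD 0

-- ===== PORT B =====
-- 'for k in range(len(word)-1, -1, -1): … return' ported as structural recursion over the range list
def lpv_go (chains : PySem.Dict String Int) (word : String) : List Int → Int
  | [] => 1
  | k :: ks =>
    match chains.get? (PySem.Str.slice word none (some k)) with
    | some c => c + 1
    | none => lpv_go chains word ks

def longest_prefix_value (chains : PySem.Dict String Int) (word : String) : Int :=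
  lpv_go chains word (PySem.List.pyRange (PySem.Str.len word - 1) (-1) (-1))

def solution_alt (n : Int) (words : List String) : Int :=
  ((PySem.List.sorted words (fun x => x)).foldl
    (fun st word =>
      let v := longest_prefix_value st.1 word
      (st.1.insert word v, if v > st.2 then v else st.2))
    (PySem.Dict.empty, 0)).2

-- ===== PRECONDITION & SPEC =====
-- A raises ValueError on words = [] (max() of an empty sequence); that is the only exclusion.
def Pre_solution (n : Int) (words : List String) : Prop := words ≠ []
instance (n : Int) (words : List String) : Decidable (Pre_solution n words) := by
  unfold Pre_solution; infer_instance
def pvWitness_solution : Int × List String := (2, ["a", "ab"])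

def Spec_solution (n : Int) (words : List String) (out : Int) : Prop := out = solution_alt n words
instance (n : Int) (words : List String) (out : Int) : Decidable (Spec_solution n words out) := by
  unfold Spec_solution; infer_instance

-- ===== CLAIM (what is proved, stated in full; the proofs are below) =====
def Claim_equal_solution : Prop := ∀ (n : Int) (words : List String), Dom_solution n words → Pre_solution n words → Spec_solution n words (solution n words)

-- ===== LEMMAS AND PROOFS =====

-- strict-prefix relation on strings, seen through their character lists
def SP (p w : String) : Prop := p.toList <+: w.toList ∧ p.toList.length < w.toList.length

theorem sp_iff_cond (p w : String) :
    (PySem.Str.len p < PySem.Str.len w ∧ PySem.Str.startswith w p) ↔ SP p w := by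
  rw [PySem.Str.len_eq, PySem.Str.len_eq, PySem.Str.startswith_eq]
  simp only [PySem.Chars.startswith, List.isPrefixOf_iff_prefix, SP, Nat.cast_lt]
  exact and_comm

theorem prefix_lex {p q : List Char} (hpre : p <+: q) (hlen : p.length < q.length) :
    List.Lex (· < ·) p q := by
  induction p generalizing q with
  | nil =>
    cases q with
    | nil => simp at hlen
    | cons a t => exact List.Lex.nil
  | cons a t ih =>
    obtain ⟨r, rfl⟩ := hpre
    exact List.Lex.cons (ih ⟨r, rfl⟩ (by simp at hlen ⊢; omega))

-- strict prefix is lexicographically smaller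
theorem sp_lt (p w : String) (h : SP p w) : p < w := by
  rw [String.lt_iff_toList_lt]
  exact prefix_lex h.1 h.2

-- the fold inside find_max_prefix, with the item list and the seed generalized
def fmpFold (w : String) (l : List (String × Int)) (i : Int) : Int :=
  l.foldl (fun _max pc =>
    if PySem.Str.len pc.1 < PySem.Str.len w ∧ PySem.Str.startswith w pc.1
    then max _max pc.2 else _max) i

theorem fmp_eq (d : PySem.Dict String Int) (w : String) :
    find_max_prefix d w = fmpFold w d.items 0 := rfl

theorem fmpFold_nil (w : String) (i : Int) : fmpFold w [] i = i := rfl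

theorem fmpFold_cons (w : String) (pc : String × Int) (t : List (String × Int)) (i : Int) :
    fmpFold w (pc :: t) i =
      fmpFold w t (if PySem.Str.len pc.1 < PySem.Str.len w ∧ PySem.Str.startswith w pc.1
                   then max i pc.2 else i) := rfl

theorem le_fmpFold (w : String) (l : List (String × Int)) (i : Int) : i ≤ fmpFold w l i := by
  induction l generalizing i with
  | nil => simp [fmpFold_nil]
  | cons pc t ih =>
    rw [fmpFold_cons]
    refine le_trans ?_ (ih _)
    split_ifs
    · exact le_max_left _ _
    · exact le_rfl

theorem fmpFold_ge (w : String) {l : List (String × Int)} {pc : String × Int}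
    (hm : pc ∈ l) (hc : SP pc.1 w) (i : Int) : pc.2 ≤ fmpFold w l i := by
  induction l generalizing i with
  | nil => simp at hm
  | cons hd t ih =>
    rw [fmpFold_cons]
    rcases List.mem_cons.mp hm with heq | hm
    · subst heq
      rw [if_pos ((sp_iff_cond pc.1 w).mpr hc)]
      exact le_trans (le_max_right _ _) (le_fmpFold w t _)
    · exact ih hm _

theorem fmpFold_le (w : String) {l : List (String × Int)} {B : Int}
    (h : ∀ pc ∈ l, SP pc.1 w → pc.2 ≤ B) {i : Int} (hi : i ≤ B) : fmpFold w l i ≤ B := by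
  induction l generalizing i with
  | nil => simpa [fmpFold_nil] using hi
  | cons pc t ih =>
    rw [fmpFold_cons]
    refine ih (fun q hq hs => h q (List.mem_cons_of_mem _ hq) hs) ?_
    split_ifs with hcond
    · exact max_le hi (h pc List.mem_cons_self ((sp_iff_cond pc.1 w).mp hcond))
    · exact hi

theorem fmpFold_append_singleton (w : String) (l : List (String × Int)) (pc : String × Int) (i : Int) :
    fmpFold w (l ++ [pc]) i =
      if PySem.Str.len pc.1 < PySem.Str.len w ∧ PySem.Str.startswith w pc.1
      then max (fmpFold w l i) pc.2 else fmpFold w l i := by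
  simp only [fmpFold, List.foldl_append, List.foldl_cons, List.foldl_nil]

theorem getD_eq_get?_getD (d : PySem.Dict String Int) (k : String) :
    d.getD k 0 = (d.get? k).getD 0 := by
  simp [PySem.Dict.getD, PySem.Dict.get?]

-- the probe string word[:k]
theorem strTake_toList (w : String) (k : Int) (hk : 0 ≤ k) :
    (PySem.Str.slice w none (some k)).toList = w.toList.take k.toNat := by
  rw [PySem.Str.toList_slice, PySem.Chars.slice_eq_listSlice, PySem.List.slice_to _ hk]

-- a strict prefix of w of known length IS the probe string of that length
theorem sp_eq_strTake (p w : String) (h : SP p w) :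
    p = PySem.Str.slice w none (some (p.toList.length : Int)) := by
  apply String.toList_inj.mp
  rw [strTake_toList w _ (by positivity), Int.toNat_natCast]
  exact List.prefix_iff_eq_take.mp h.1

-- chain-length invariant: every stored value is one more than the best strict-prefix value
def DInv2 (d : PySem.Dict String Int) : Prop :=
  ∀ q ∈ d.keys, d.getD q 0 = find_max_prefix d q + 1

theorem value_mono (d : PySem.Dict String Int) (hnd : d.keys.Nodup) (h2 : DInv2 d)
    {p : String} {c : Int} {q : String} {v : Int}
    (hp : (p, c) ∈ d.items) (hq : d.get? q = some v) (hsp : SP p q) : c + 1 ≤ v := by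
  have hqk : q ∈ d.keys := by
    by_contra hk
    rw [← PySem.Dict.get?_eq_none_iff_not_mem_keys] at hk
    simp [hk] at hq
  have hv : d.getD q 0 = v := by rw [getD_eq_get?_getD, hq]; rfl
  have h2q := h2 q hqk
  have hge : c ≤ find_max_prefix d q := by
    rw [fmp_eq]
    exact fmpFold_ge q hp hsp 0
  omega

-- the core: the descending probe loop computes find_max_prefix + 1
theorem lpv_spec_aux (m : Nat) : ∀ (d : PySem.Dict String Int) (w : String),
    (m : Int) - 1 < PySem.Str.len w → d.keys.Nodup → DInv2 d →
    (∀ p ∈ d.keys, SP p w → (p.toList.length : Int) ≤ (m : Int) - 1) →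
    lpv_go d w (PySem.List.pyRange ((m : Int) - 1) (-1) (-1)) = find_max_prefix d w + 1 := by
  induction m with
  | zero =>
    intro d w _ hnd h2 hbnd
    rw [show ((0:Nat):Int) - 1 = -1 by norm_num, PySem.List.pyRange_neg_one_eq_nil le_rfl]
    have hle : find_max_prefix d w ≤ 0 := by
      rw [fmp_eq]
      refine fmpFold_le w ?_ le_rfl
      intro pc hpc hsp
      exfalso
      have hb := hbnd pc.1 (PySem.Dict.mem_keys_of_mem_items d hpc) hsp
      have h0 : (0:Int) ≤ (pc.1.toList.length : Int) := by positivity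
      omega
    have hge : (0:Int) ≤ find_max_prefix d w := by rw [fmp_eq]; exact le_fmpFold w d.items 0
    have : find_max_prefix d w = 0 := le_antisymm hle hge
    rw [lpv_go, this]
    norm_num
  | succ k ih =>
    intro d w hlt hnd h2 hbnd
    have ha : ((k+1:Nat):Int) - 1 = (k:Int) := by push_cast; ring
    rw [ha] at hlt hbnd ⊢
    have hklen : k < w.toList.length := by
      rw [PySem.Str.len_eq] at hlt; exact_mod_cast hlt
    rw [PySem.List.pyRange_neg_one_cons (by omega : (-1:Int) < (k:Int)), lpv_go]
    have hsl : (PySem.Str.slice w none (some (k:Int))).toList = w.toList.take k := by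
      rw [strTake_toList w _ (by positivity), Int.toNat_natCast]
    have hslen : (PySem.Str.slice w none (some (k:Int))).toList.length = k := by
      rw [hsl, List.length_take]; omega
    have hsp_s : SP (PySem.Str.slice w none (some (k:Int))) w := by
      refine ⟨?_, ?_⟩
      · rw [hsl]; exact List.take_prefix _ _
      · rw [hslen]; exact hklen
    cases hq : d.get? (PySem.Str.slice w none (some (k:Int))) with
    | some v =>
      show v + 1 = find_max_prefix d w + 1
      have hmem := PySem.Dict.mem_items_of_get?_eq_some d hq
      have hge : v ≤ find_max_prefix d w := by
        rw [fmp_eq]; exact fmpFold_ge w hmem hsp_s 0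
      have hsk : PySem.Str.slice w none (some (k:Int)) ∈ d.keys :=
        PySem.Dict.mem_keys_of_mem_items d hmem
      have hv1 : (1:Int) ≤ v := by
        have h2s := h2 _ hsk
        have hgd : d.getD (PySem.Str.slice w none (some (k:Int))) 0 = v := by
          rw [getD_eq_get?_getD, hq]; rfl
        have hfge : (0:Int) ≤ find_max_prefix d (PySem.Str.slice w none (some (k:Int))) := by
          rw [fmp_eq]; exact le_fmpFold _ d.items 0
        omega
      have hle : find_max_prefix d w ≤ v := by
        rw [fmp_eq]
        refine fmpFold_le w ?_ (by omega)
        intro pc hpc hsp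
        obtain ⟨p, c⟩ := pc
        have hb := hbnd p (PySem.Dict.mem_keys_of_mem_items d hpc) hsp
        have hb' : p.toList.length ≤ k := by exact_mod_cast hb
        rcases eq_or_lt_of_le hb' with heq | hlt'
        · have hps : p = PySem.Str.slice w none (some (k:Int)) := by
            have hx := sp_eq_strTake p w hsp
            rw [heq] at hx; exact hx
          have hgc : d.get? p = some c := PySem.Dict.get?_of_mem_items d hpc hnd
          rw [hps, hq] at hgc
          exact le_of_eq (Option.some.inj hgc).symm
        · have hsp2 : SP p (PySem.Str.slice w none (some (k:Int))) := by
            refine ⟨?_, ?_⟩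
            · rw [List.prefix_iff_eq_take, hsl, List.take_take,
                  min_eq_left (le_of_lt hlt')]
              exact List.prefix_iff_eq_take.mp hsp.1
            · rw [hslen]; exact hlt'
          have := value_mono d hnd h2 hpc hq hsp2
          omega
      have : find_max_prefix d w = v := le_antisymm hle hge
      omega
    | none =>
      show lpv_go d w (PySem.List.pyRange ((k:Int) - 1) (-1) (-1)) = find_max_prefix d w + 1
      have hkk : ((k:Int)) - 1 = ((k:Nat):Int) - 1 := rfl
      rw [hkk]
      refine ih d w ?_ hnd h2 ?_
      · rw [PySem.Str.len_eq]; omega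
      · intro p hp hsp
        have hb := hbnd p hp hsp
        have hb' : p.toList.length ≤ k := by exact_mod_cast hb
        rcases eq_or_lt_of_le hb' with heq | hlt'
        · exfalso
          have hps : p = PySem.Str.slice w none (some (k:Int)) := by
            have := sp_eq_strTake p w hsp
            rw [heq] at this; exact this
          rw [PySem.Dict.get?_eq_none_iff_not_mem_keys] at hq
          exact hq (hps ▸ hp)
        · omega

theorem lpv_spec (d : PySem.Dict String Int) (w : String) (hnd : d.keys.Nodup) (h2 : DInv2 d) :
    longest_prefix_value d w = find_max_prefix d w + 1 := by
  unfold longest_prefix_value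
  have hlen : PySem.Str.len w = (w.toList.length : Int) := PySem.Str.len_eq w
  have hm : PySem.Str.len w - 1 = ((w.toList.length : Nat) : Int) - 1 := by rw [hlen]
  rw [hm]
  refine lpv_spec_aux w.toList.length d w (by omega) hnd h2 ?_
  intro p hp hsp
  have := hsp.2
  omega

-- the two loop bodies, named
def fA (chains : PySem.Dict String Int) (word : String) : PySem.Dict String Int :=
  let existing_chain_length := find_max_prefix chains word
  if chains.contains word
  then chains.insert word (max (existing_chain_length + 1) (chains.getD word 0))
  else chains.insert word (existing_chain_length + 1)

def fB (st : PySem.Dict String Int × Int) (word : String) : PySem.Dict String Int × Int :=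
  let v := longest_prefix_value st.1 word
  (st.1.insert word v, if v > st.2 then v else st.2)

def DInv (d : PySem.Dict String Int) (best : Int) : Prop :=
  d.keys.Nodup ∧ DInv2 d ∧ (∀ x ∈ d.values, x ≤ best) ∧
  (d.items = [] → best = 0) ∧ (d.items ≠ [] → best ∈ d.values)

theorem step_main (d : PySem.Dict String Int) (best : Int) (w : String)
    (hI : DInv d best) (hub : ∀ k ∈ d.keys, k ≤ w) :
    fA d w = (fB (d, best) w).1 ∧ DInv (fA d w) (fB (d, best) w).2 ∧
    (fA d w).items ≠ [] ∧ (∀ k ∈ (fA d w).keys, k ∈ d.keys ∨ k = w) := by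
  obtain ⟨hnd, h2, h3, h4, h5⟩ := hI
  have hlpv : longest_prefix_value d w = find_max_prefix d w + 1 := lpv_spec d w hnd h2
  have he0 : 0 ≤ find_max_prefix d w := by rw [fmp_eq]; exact le_fmpFold _ _ _
  by_cases hw : w ∈ d.keys
  · -- the word is already a key: both sides store the value it already has
    have hcont : d.contains w = true := by
      rw [PySem.Dict.contains_eq_decide_mem_keys]; simpa using hw
    have hgd : d.getD w 0 = find_max_prefix d w + 1 := h2 w hw
    have hget : d.get? w = some (find_max_prefix d w + 1) := by
      rw [getD_eq_get?_getD] at hgd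
      cases hg : d.get? w with
      | none =>
        rw [PySem.Dict.get?_eq_none_iff_not_mem_keys] at hg
        exact absurd hw hg
      | some c =>
        rw [hg] at hgd
        simp only [Option.getD_some] at hgd
        rw [hgd]
    have hA : fA d w = d.insert w (find_max_prefix d w + 1) := by
      unfold fA
      rw [hcont, if_pos rfl, hgd, max_self]
    have hB1 : (fB (d, best) w).1 = d.insert w (find_max_prefix d w + 1) := by
      unfold fB
      simp only
      rw [hlpv]
    have hins : d.insert w (find_max_prefix d w + 1) = d := by
      apply PySem.Dict.ext
      rw [PySem.Dict.items_insert, if_pos hcont]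
      have hid : ∀ p ∈ d.items,
          (if p.1 == w then (w, find_max_prefix d w + 1) else p) = p := by
        intro p hp
        obtain ⟨p1, p2⟩ := p
        by_cases hpw : p1 = w
        · subst hpw
          have hg := PySem.Dict.get?_of_mem_items d hp hnd
          rw [hget] at hg
          simp only [beq_self_eq_true, if_pos]
          rw [Option.some.inj hg]
        · simp [hpw]
      rw [List.map_congr_left hid]
      exact List.map_id' d.items
    have hv_mem : find_max_prefix d w + 1 ∈ d.values := by
      have hmem := PySem.Dict.mem_items_of_get?_eq_some d hget
      simp only [PySem.Dict.values]
      exact List.mem_map.mpr ⟨_, hmem, rfl⟩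
    have hvle : find_max_prefix d w + 1 ≤ best := h3 _ hv_mem
    have hB2 : (fB (d, best) w).2 = best := by
      unfold fB
      simp only
      rw [hlpv, if_neg (by omega)]
    have hne : d.items ≠ [] := by
      intro hnil
      have : d.keys = [] := by simp [PySem.Dict.keys, hnil]
      rw [this] at hw
      simp at hw
    refine ⟨by rw [hA, hB1], ?_, ?_, ?_⟩
    · rw [hA, hins, hB2]; exact ⟨hnd, h2, h3, h4, h5⟩
    · rw [hA, hins]; exact hne
    · rw [hA, hins]; exact fun k hk => Or.inl hk
  · -- fresh key: both sides append (w, find_max_prefix d w + 1)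
    have hcont : d.contains w = false := by
      rw [PySem.Dict.contains_eq_decide_mem_keys]; simpa using hw
    have hA : fA d w = d.insert w (find_max_prefix d w + 1) := by
      unfold fA
      rw [hcont]
      simp
    have hB1 : (fB (d, best) w).1 = d.insert w (find_max_prefix d w + 1) := by
      unfold fB
      simp only
      rw [hlpv]
    have hB2 : (fB (d, best) w).2 =
        if find_max_prefix d w + 1 > best then find_max_prefix d w + 1 else best := by
      unfold fB
      simp only
      rw [hlpv]
    have hitems : (d.insert w (find_max_prefix d w + 1)).items
        = d.items ++ [(w, find_max_prefix d w + 1)] := by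
      rw [PySem.Dict.items_insert, hcont]
      simp
    have hkeys : (d.insert w (find_max_prefix d w + 1)).keys = d.keys ++ [w] := by
      simp [PySem.Dict.keys, hitems]
    have hvals : (d.insert w (find_max_prefix d w + 1)).values
        = d.values ++ [find_max_prefix d w + 1] := by
      simp [PySem.Dict.values, hitems]
    have hfmp : ∀ q, (q ∈ d.keys ∨ q = w) →
        find_max_prefix (d.insert w (find_max_prefix d w + 1)) q = find_max_prefix d q := by
      intro q hq
      rw [fmp_eq, hitems, fmpFold_append_singleton, ← fmp_eq]
      rw [if_neg]
      intro hcond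
      have hsp : SP w q := (sp_iff_cond w q).mp hcond
      rcases hq with hq | rfl
      · exact absurd (sp_lt w q hsp) (not_lt.mpr (hub q hq))
      · exact absurd hsp.2 (lt_irrefl _)
    refine ⟨by rw [hA, hB1], ?_, ?_, ?_⟩
    · rw [hA, hB2]
      refine ⟨?_, ?_, ?_, ?_, ?_⟩
      · rw [hkeys]
        simp only [List.nodup_append, List.nodup_cons, List.nodup_nil]
        refine ⟨hnd, by simp, ?_⟩
        intro a ha b hb
        simp only [List.mem_singleton] at hb
        subst hb
        exact fun heq => hw (heq ▸ ha)
      · intro q hq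
        rw [hkeys] at hq
        simp only [List.mem_append, List.mem_singleton] at hq
        rw [hfmp q hq]
        rcases hq with hq | rfl
        · have hqw : q ≠ w := fun h => hw (h ▸ hq)
          rw [PySem.Dict.getD_insert, if_neg hqw]
          exact h2 q hq
        · rw [PySem.Dict.getD_insert, if_pos rfl]
      · intro x hx
        rw [hvals] at hx
        rcases List.mem_append.mp hx with hx | hx
        · have := h3 x hx
          split_ifs <;> omega
        · simp only [List.mem_singleton] at hx
          subst hx
          split_ifs <;> omega
      · intro hnil
        rw [hitems] at hnil
        simp at hnil
      · intro _
        rw [hvals]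
        by_cases hbv : find_max_prefix d w + 1 > best
        · rw [if_pos hbv]
          simp
        · rw [if_neg hbv]
          have hdne : d.items ≠ [] := by
            intro hnil
            have hb0 := h4 hnil
            omega
          exact List.mem_append.mpr (Or.inl (h5 hdne))
    · rw [hA, hitems]
      simp
    · rw [hA, hkeys]
      intro k hk
      simpa using List.mem_append.mp hk

theorem fold_main (l : List String) : ∀ (d : PySem.Dict String Int) (best : Int),
    l.Pairwise (· ≤ ·) → (∀ k ∈ d.keys, ∀ w ∈ l, k ≤ w) → DInv d best →
    l.foldl fA d = (l.foldl fB (d, best)).1 ∧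
    DInv (l.foldl fA d) (l.foldl fB (d, best)).2 ∧
    ((l ≠ [] ∨ d.items ≠ []) → (l.foldl fA d).items ≠ []) := by
  induction l with
  | nil =>
    intro d best _ _ hI
    refine ⟨rfl, hI, ?_⟩
    rintro (h | h)
    · exact absurd rfl h
    · exact h
  | cons w t ih =>
    intro d best hpw hub hI
    obtain ⟨hEq, hI', hne', hkeys'⟩ :=
      step_main d best w hI (fun k hk => hub k hk w List.mem_cons_self)
    have hpw' := List.pairwise_cons.mp hpw
    simp only [List.foldl_cons]
    have hpair : fB (d, best) w = (fA d w, (fB (d, best) w).2) := by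
      rw [hEq]
    have hub' : ∀ k ∈ (fA d w).keys, ∀ w' ∈ t, k ≤ w' := by
      intro k hk w' hw'
      rcases hkeys' k hk with hk' | rfl
      · exact hub k hk' w' (List.mem_cons_of_mem _ hw')
      · exact hpw'.1 w' hw'
    rw [hpair]
    obtain ⟨hEq2, hI2, hne2⟩ := ih (fA d w) ((fB (d, best) w).2) hpw'.2 hub' hI'
    exact ⟨hEq2, hI2, fun _ => hne2 (Or.inr hne')⟩

-- ===== VERDICT (by name: the statement is the Claim_ definition above) =====
theorem solution_spec : Claim_equal_solution := by
  intro n words _ hpre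
  unfold Spec_solution
  have hsA : solution n words =
      (PySem.List.max? ((PySem.List.sorted words (fun x => x)).foldl fA
        PySem.Dict.empty).values (fun v => v)).getD 0 := rfl
  have hsB : solution_alt n words =
      ((PySem.List.sorted words (fun x => x)).foldl fB (PySem.Dict.empty, 0)).2 := rfl
  rw [hsA, hsB]
  have hlne : PySem.List.sorted words (fun x => x) ≠ [] := by
    intro h
    exact hpre ((PySem.List.sorted_eq_nil_iff words _ false).mp h)
  have hpw : (PySem.List.sorted words (fun x => x)).Pairwise (· ≤ ·) :=
    PySem.List.sorted_pairwise words _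
  have hIe : DInv PySem.Dict.empty 0 := by
    refine ⟨?_, ?_, ?_, ?_, ?_⟩
    · simp [PySem.Dict.empty, PySem.Dict.keys]
    · intro q hq
      simp [PySem.Dict.empty, PySem.Dict.keys] at hq
    · intro x hx
      simp [PySem.Dict.empty, PySem.Dict.values] at hx
    · intro _
      rfl
    · intro h
      exact absurd rfl h
  obtain ⟨hEq, hI, hne⟩ := fold_main (PySem.List.sorted words (fun x => x))
    PySem.Dict.empty 0 hpw (by simp [PySem.Dict.empty, PySem.Dict.keys]) hIe
  have hne' := hne (Or.inl hlne)
  obtain ⟨hnd, h2, h3, h4, h5⟩ := hI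
  have hvne : ((PySem.List.sorted words (fun x => x)).foldl fA PySem.Dict.empty).values ≠ [] := by
    simpa [PySem.Dict.values] using hne'
  cases hmax : PySem.List.max? ((PySem.List.sorted words (fun x => x)).foldl fA
      PySem.Dict.empty).values (fun v => v) with
  | none => exact absurd ((PySem.List.max?_eq_none_iff _ _).mp hmax) hvne
  | some m =>
    have hm1 := PySem.List.max?_mem hmax
    have hle1 := h3 m hm1
    have hle2 := PySem.List.max?_isMax hmax _ (h5 hne')
    simp only [Option.getD_some]
    omega
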